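-- pv_equiv track=rewrite | github.com/alanbui2808/Leetcode | sliding_window/1297_Maximum_Number_of_Occurrences_of_a_Substring/solution.py | solution
-- ===== SOURCE A (Python) =====
-- from collections import defaultdict
--
-- def solution(s, max_letters, min_size, max_size):
--   N = len(s)
--
--   '''
--   Observation:
--     (1). Sliding Window [L, R]
--     (2). Maintain a window [L, R]:
--       - if len(count) <= max_letters or R-L+1 == min_size: Record s[L:R+1] occurence and update result
--
--       - If len(count) > max_letters or R-L+1 > min_size: we must shrink L
--         Note: We strictly keep len([L, R]) <= min_size because: Suppose we have a valid [L, R]: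
--         e.g: aaab, max_letters = 2, min = 2, max = 4
--
--         If we keep expanding aaab and only shrink when R-L+1 >= max_size, then we could only record
--         occurence of aaab, aab and misses ab. Hence we greedily count the shortest valid substr
--
--         There is no way aaab (or aab) might occur more than ab because ab is inside these strings.
--
--   Time: O(N + min_size*N), sliding window is O(N), min_size <= 26
--   Space: O(26N)
--   '''
--
--   count = defaultdict(int)
--   occ = defaultdict(int)
--
--   L = 0
--   result = 0
--
--   for R in range(N):
--     count[s[R]] += 1
--
--     '''
--     Shrink if either:
--       1. len(count) > max_letters
--       2. R-L+1 > min_size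
--     '''
--     while L < R and (len(count)>max_letters or R-L+1>min_size):
--       count[s[L]] -= 1
--       if count[s[L]] == 0:
--         del count[s[L]]
--
--       L += 1
--
--     # len(count) <= max_letters and R-L+1 <= min_size
--     # However we interested in: len(count) <= max_letters and R-L+1 == min_size
--     if R-L+1 == min_size:
--       substr = s[L:R+1]
--       occ[substr] += 1
--       result = max(result, occ[substr])
--
--   return result
-- ===== SOURCE B (Python) =====
-- def solution(s, max_letters, min_size, max_size):
--     n = len(s)
--     if min_size < 1:
--         return 0
--     occ = {}
--     best = 0
--     for i in range(n - min_size + 1):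
--         sub = s[i:i + min_size]
--         if len(set(sub)) <= max_letters:
--             occ[sub] = occ.get(sub, 0) + 1
--             best = max(best, occ[sub])
--     return best
-- ===== Notes on version B (the rewrite author's own statement) =====
-- stated objective: simpler
-- what changed: Replaced the incremental two-pointer sliding window with its count/shrink bookkeeping by a direct enumeration of every fixed-length window, recomputing each window's distinct-letter count with set().
-- intended difference: When min_size == 1, max_letters < 1 and s is non-empty, A records every single-character window regardless of the letter limit (its shrink loop requires L < R) and returns the maximum character frequency, while B returns 0, which is the intended value since no window may use more than max_letters distinct letters. — e.g. on solution("a", 0, 1, 1): A returns 1, B returns 0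
import Mathlib
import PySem

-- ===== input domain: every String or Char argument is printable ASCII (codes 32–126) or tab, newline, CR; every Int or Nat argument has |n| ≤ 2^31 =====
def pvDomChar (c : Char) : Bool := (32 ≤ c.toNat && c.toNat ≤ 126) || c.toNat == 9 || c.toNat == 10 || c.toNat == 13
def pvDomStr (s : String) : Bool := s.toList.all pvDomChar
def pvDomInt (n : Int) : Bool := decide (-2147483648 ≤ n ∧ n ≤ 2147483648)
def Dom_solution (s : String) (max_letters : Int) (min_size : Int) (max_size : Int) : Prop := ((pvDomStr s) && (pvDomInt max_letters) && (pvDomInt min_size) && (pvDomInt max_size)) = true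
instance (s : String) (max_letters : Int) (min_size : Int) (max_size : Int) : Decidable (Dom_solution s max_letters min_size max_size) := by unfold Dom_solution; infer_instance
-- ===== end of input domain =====

-- B replaces A's two-pointer sliding window (incremental count dict + shrink loop) by a direct
-- enumeration of every window of length min_size, recomputing each window's distinct letters with set().

-- ===== PORT A =====
-- state of A's outer loop: (count, L, occ, result)
structure StateA where
  count : PySem.Dict Char Int
  L : Nat
  occ : PySem.Dict String Int
  result : Int

-- the inner 'while L < R and (len(count) > max_letters or R-L+1 > min_size)' loop;
-- fuel bounds the iterations (every call site passes fuel ≥ R - L; the guard L < R is unchanged,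
-- so exhausted fuel coincides with a false guard and the encoding is exact)
def shrinkA (cs : List Char) (max_letters min_size : Int) (R : Nat) :
    Nat → PySem.Dict Char Int → Nat → PySem.Dict Char Int × Nat
  | 0, count, L => (count, L)
  | fuel + 1, count, L =>
    if L < R ∧ (max_letters < (count.size : Int) ∨ min_size < (R : Int) - (L : Int) + 1) then
      let c := cs.getD L ' '                                -- s[L], L < R < len(s)
      let count1 := count.insert c (count.getD c 0 - 1)     -- count[s[L]] -= 1 (defaultdict)
      let count2 := if count1.getD c 0 = 0 then count1.erase c else count1   -- if count[s[L]] == 0: del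
      shrinkA cs max_letters min_size R fuel count2 (L + 1)
    else (count, L)

-- one iteration of 'for R in range(N)'
def stepA (cs : List Char) (max_letters min_size : Int) (st : StateA) (R : Nat) : StateA :=
  let c := cs.getD R ' '                                    -- s[R], R < len(s)
  let count1 := st.count.insert c (st.count.getD c 0 + 1)   -- count[s[R]] += 1 (defaultdict)
  let p := shrinkA cs max_letters min_size R R count1 st.L
  if (R : Int) - (p.2 : Int) + 1 = min_size then
    let substr := String.ofList ((cs.drop p.2).take (R + 1 - p.2))   -- s[L:R+1], 0 ≤ L ≤ R+1 ≤ len(s)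
    let v := st.occ.getD substr 0 + 1                       -- occ[substr] += 1 (defaultdict)
    { count := p.1, L := p.2, occ := st.occ.insert substr v, result := max st.result v }
  else
    { count := p.1, L := p.2, occ := st.occ, result := st.result }

def solution (s : String) (max_letters : Int) (min_size : Int) (max_size : Int) : Int :=
  let cs := s.toList
  ((List.range cs.length).foldl (stepA cs max_letters min_size)
    ⟨PySem.Dict.empty, 0, PySem.Dict.empty, 0⟩).result

-- ===== PORT B =====
-- one iteration of 'for i in range(n - min_size + 1)' (m = min_size as a Nat, 1 ≤ min_size)
def stepB (cs : List Char) (max_letters : Int) (m : Nat)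
    (st : PySem.Dict String Int × Int) (i : Nat) : PySem.Dict String Int × Int :=
  let sub := (cs.drop i).take m                             -- s[i:i+min_size]
  if ((PySem.Set.ofList sub).length : Int) ≤ max_letters then   -- len(set(sub)) <= max_letters
    let substr := String.ofList sub
    let v := st.1.getD substr 0 + 1                         -- occ[sub] = occ.get(sub, 0) + 1
    (st.1.insert substr v, max st.2 v)                      -- best = max(best, occ[sub])
  else st

def solution_alt (s : String) (max_letters : Int) (min_size : Int) (max_size : Int) : Int :=
  if min_size < 1 then 0
  else
    let cs := s.toList
    ((List.range (cs.length + 1 - min_size.toNat)).foldl    -- range(n - min_size + 1)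
      (stepB cs max_letters min_size.toNat) (PySem.Dict.empty, 0)).2

-- ===== PRECONDITION & SPEC =====
-- When min_size == 1, max_letters < 1 and s is non-empty, A records every single-character window
-- regardless of the letter limit (its shrink loop requires L < R) and returns the maximum character
-- frequency, while B returns 0, which is the intended value since no window may use more than
-- max_letters distinct letters.
def D_solution (s : String) (max_letters : Int) (min_size : Int) (max_size : Int) : Prop :=
  min_size = 1 ∧ max_letters < 1 ∧ s ≠ ""
instance (s : String) (max_letters : Int) (min_size : Int) (max_size : Int) : Decidable (D_solution s max_letters min_size max_size) := by unfold D_solution; infer_instance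

def Spec_solution (s : String) (max_letters : Int) (min_size : Int) (max_size : Int) (out : Int) : Prop := ¬ D_solution s max_letters min_size max_size → out = solution_alt s max_letters min_size max_size
instance (s : String) (max_letters : Int) (min_size : Int) (max_size : Int) (out : Int) : Decidable (Spec_solution s max_letters min_size max_size out) := by unfold Spec_solution; infer_instance

def pvDiffWitness_solution : String × Int × Int × Int := ("a", 0, 1, 1)
def pvDiffWitnessOut_solution : Int × Int := (1, 0)

-- ===== CLAIM (what is proved, stated in full; the proofs are below) =====
def Claim_unchanged_solution : Prop := ∀ (s : String) (max_letters : Int) (min_size : Int) (max_size : Int), Dom_solution s max_letters min_size max_size → Spec_solution s max_letters min_size max_size (solution s max_letters min_size max_size)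
def Claim_changed_solution : Prop := Dom_solution (pvDiffWitness_solution.1) (pvDiffWitness_solution.2.1) (pvDiffWitness_solution.2.2.1) (pvDiffWitness_solution.2.2.2) ∧ D_solution (pvDiffWitness_solution.1) (pvDiffWitness_solution.2.1) (pvDiffWitness_solution.2.2.1) (pvDiffWitness_solution.2.2.2) ∧ solution (pvDiffWitness_solution.1) (pvDiffWitness_solution.2.1) (pvDiffWitness_solution.2.2.1) (pvDiffWitness_solution.2.2.2) = pvDiffWitnessOut_solution.1 ∧ solution_alt (pvDiffWitness_solution.1) (pvDiffWitness_solution.2.1) (pvDiffWitness_solution.2.2.1) (pvDiffWitness_solution.2.2.2) = pvDiffWitnessOut_solution.2 ∧ pvDiffWitnessOut_solution.1 ≠ pvDiffWitnessOut_solution.2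
def Claim_exact_solution : Prop := ∀ (s : String) (max_letters : Int) (min_size : Int) (max_size : Int), Dom_solution s max_letters min_size max_size → D_solution s max_letters min_size max_size → solution s max_letters min_size max_size ≠ solution_alt s max_letters min_size max_size

-- ===== LEMMAS AND PROOFS =====

-- A's outer loop after k iterations
def loopA (cs : List Char) (max_letters min_size : Int) (k : Nat) : StateA :=
  (List.range k).foldl (stepA cs max_letters min_size) ⟨PySem.Dict.empty, 0, PySem.Dict.empty, 0⟩

-- B's loop after t iterations
def loopB (cs : List Char) (max_letters : Int) (m : Nat) (t : Nat) : PySem.Dict String Int × Int :=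
  (List.range t).foldl (stepB cs max_letters m) (PySem.Dict.empty, 0)

-- the window s[L:k] of A after k iterations
def winA (cs : List Char) (L k : Nat) : List Char := (cs.take k).drop L

-- 'count is the multiset of the window w'
def IsCounter (d : PySem.Dict Char Int) (w : List Char) : Prop :=
  d.keys.Nodup ∧ (∀ c, d.getD c 0 = (w.count c : Int)) ∧ (∀ c, c ∈ d.keys ↔ c ∈ w)

theorem loopA_succ (cs : List Char) (K m : Int) (k : Nat) :
    loopA cs K m (k + 1) = stepA cs K m (loopA cs K m k) k := by
  simp [loopA, List.range_succ]

theorem loopB_succ (cs : List Char) (K : Int) (m t : Nat) :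
    loopB cs K m (t + 1) = stepB cs K m (loopB cs K m t) t := by
  simp [loopB, List.range_succ]

-- Dict.erase facts (no erase lemmas in the prelude)
theorem get?_erase {ν : Type} (d : PySem.Dict Char ν) (k x : Char) :
    (d.erase k).get? x = if x = k then none else d.get? x := by
  rcases d with ⟨items⟩
  induction items with
  | nil => simp [PySem.Dict.erase, PySem.Dict.get?]
  | cons p t ih =>
    by_cases hpk : p.1 = k <;> by_cases hpx : p.1 = x
    · have hxk : x = k := hpk ▸ hpx.symm ▸ rfl
      simp_all [PySem.Dict.erase, PySem.Dict.get?]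
    · simp_all [PySem.Dict.erase, PySem.Dict.get?]
    · have hxk : ¬ x = k := by rw [← hpx]; exact fun h => hpk (hpx ▸ h)
      simp_all [PySem.Dict.erase, PySem.Dict.get?]
    · simp_all [PySem.Dict.erase, PySem.Dict.get?]

theorem mem_keys_erase {ν : Type} (d : PySem.Dict Char ν) (k x : Char) :
    x ∈ (d.erase k).keys ↔ x ∈ d.keys ∧ x ≠ k := by
  simp only [PySem.Dict.erase, PySem.Dict.keys, List.mem_map, List.mem_filter]
  constructor
  · rintro ⟨p, ⟨hp, hne⟩, rfl⟩
    exact ⟨⟨p, hp, rfl⟩, by simpa using hne⟩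
  · rintro ⟨⟨p, hp, rfl⟩, hne⟩
    exact ⟨p, ⟨hp, by simpa using hne⟩, rfl⟩

theorem nodup_keys_erase {ν : Type} (d : PySem.Dict Char ν) (k : Char)
    (h : d.keys.Nodup) : (d.erase k).keys.Nodup := by
  have hsub : (d.erase k).keys.Sublist d.keys :=
    List.Sublist.map _ (List.filter_sublist)
  exact h.sublist hsub

-- a nodup list with the same members as w has length = number of distinct elements of w
theorem length_eq_card {l w : List Char} (hn : l.Nodup) (hm : ∀ c, c ∈ l ↔ c ∈ w) :
    l.length = w.toFinset.card := by
  have h : l.toFinset = w.toFinset := by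
    ext c; simp [List.mem_toFinset, hm]
  rw [← List.toFinset_card_of_nodup hn, h]

theorem size_eq_card {d : PySem.Dict Char Int} {w : List Char} (h : IsCounter d w) :
    (d.size : Int) = (w.toFinset.card : Int) := by
  have hk : d.size = d.keys.length := by
    simp [PySem.Dict.size, PySem.Dict.keys]
  rw [hk, length_eq_card h.1 h.2.2]

theorem setLen_eq_card (w : List Char) : (PySem.Set.ofList w).length = w.toFinset.card :=
  length_eq_card (PySem.Set.nodup_ofList w) (fun c => PySem.Set.mem_ofList w c)

theorem card_mono {w1 w2 : List Char} (h : w1.Sublist w2) :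
    w1.toFinset.card ≤ w2.toFinset.card :=
  Finset.card_le_card (fun c hc => by
    simp only [List.mem_toFinset] at *
    exact h.subset hc)

theorem isCounter_empty : IsCounter PySem.Dict.empty ([] : List Char) := by
  refine ⟨?_, ?_, ?_⟩
  · simp [PySem.Dict.keys_empty]
  · intro c; simp [PySem.Dict.getD_empty]
  · intro c; simp [PySem.Dict.keys_empty]

theorem isCounter_push {d : PySem.Dict Char Int} {w : List Char} (h : IsCounter d w) (c : Char) :
    IsCounter (d.insert c (d.getD c 0 + 1)) (w ++ [c]) := by
  obtain ⟨hn, hg, hmem⟩ := h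
  refine ⟨PySem.Dict.nodup_keys_insert _ _ _ hn, ?_, ?_⟩
  · intro c'
    rw [PySem.Dict.getD_insert]
    by_cases hc : c' = c
    · subst hc
      rw [if_pos rfl, hg, List.count_append]
      simp
    · rw [if_neg hc, hg, List.count_append]
      simp [Ne.symm hc]
  · intro c'
    rw [PySem.Dict.mem_keys_insert, hmem]
    simp [or_comm]

theorem isCounter_pop {d : PySem.Dict Char Int} {w : List Char} {c : Char}
    (h : IsCounter d (c :: w)) :
    IsCounter (if (d.insert c (d.getD c 0 - 1)).getD c 0 = 0
               then (d.insert c (d.getD c 0 - 1)).erase c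
               else d.insert c (d.getD c 0 - 1)) w := by
  obtain ⟨hn, hg, hmem⟩ := h
  have hgc : d.getD c 0 = (w.count c : Int) + 1 := by
    rw [hg]; simp
  have hd1g : ∀ c', (d.insert c (d.getD c 0 - 1)).getD c' 0 =
      if c' = c then (w.count c : Int) else ((c :: w).count c' : Int) := by
    intro c'
    rw [PySem.Dict.getD_insert]
    by_cases hc : c' = c
    · simp [hc, hgc]
    · simp [hc, hg]
  have hd1n : (d.insert c (d.getD c 0 - 1)).keys.Nodup :=
    PySem.Dict.nodup_keys_insert _ _ _ hn
  have hd1mem : ∀ c', c' ∈ (d.insert c (d.getD c 0 - 1)).keys ↔ c' = c ∨ c' ∈ w := by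
    intro c'
    rw [PySem.Dict.mem_keys_insert, hmem]
    simp [List.mem_cons]
  split
  · next hzero =>
    have hc0 : (w.count c : Int) = 0 := by rw [hd1g c, if_pos rfl] at hzero; exact hzero
    have hcnot : c ∉ w := by
      intro hcw
      have := List.count_pos_iff.mpr hcw
      omega
    refine ⟨nodup_keys_erase _ _ hd1n, ?_, ?_⟩
    · intro c'
      rw [PySem.Dict.getD_eq_get?_getD, get?_erase]
      by_cases hc : c' = c
      · subst hc; simp [List.count_eq_zero_of_not_mem hcnot]
      · rw [if_neg hc, ← PySem.Dict.getD_eq_get?_getD, hd1g, if_neg hc]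
        simp [Ne.symm hc]
    · intro c'
      rw [mem_keys_erase, hd1mem]
      constructor
      · rintro ⟨h1 | h1, h2⟩
        · exact absurd h1 h2
        · exact h1
      · intro hw
        refine ⟨Or.inr hw, ?_⟩
        intro hcc; exact hcnot (hcc ▸ hw)
  · next hzero =>
    have hcw : c ∈ w := by
      rw [hd1g c, if_pos rfl] at hzero
      have : w.count c ≠ 0 := by intro h0; exact hzero (by exact_mod_cast h0)
      exact List.count_pos_iff.mp (Nat.pos_of_ne_zero this)
    refine ⟨hd1n, ?_, ?_⟩
    · intro c'
      rw [hd1g]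
      by_cases hc : c' = c
      · simp [hc]
      · simp [hc, Ne.symm hc]
    · intro c'
      rw [hd1mem]
      constructor
      · rintro (rfl | h1)
        · exact hcw
        · exact h1
      · exact Or.inr

-- full characterisation of the shrink loop
theorem shrink_spec (cs : List Char) (K m : Int) (R : Nat) (hR : R < cs.length) :
    ∀ (fuel L : Nat) (count : PySem.Dict Char Int), R - L ≤ fuel → L ≤ R →
    IsCounter count (winA cs L (R + 1)) →
    L ≤ (shrinkA cs K m R fuel count L).2 ∧
    (shrinkA cs K m R fuel count L).2 ≤ R ∧
    IsCounter (shrinkA cs K m R fuel count L).1 (winA cs (shrinkA cs K m R fuel count L).2 (R + 1)) ∧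
    ((shrinkA cs K m R fuel count L).2 = R ∨
      (((winA cs (shrinkA cs K m R fuel count L).2 (R + 1)).toFinset.card : Int) ≤ K ∧
       (R : Int) - (shrinkA cs K m R fuel count L).2 + 1 ≤ m)) ∧
    (∀ j : Nat, L ≤ j → j < (shrinkA cs K m R fuel count L).2 →
      (K < ((winA cs j (R + 1)).toFinset.card : Int) ∨ m < (R : Int) - (j : Int) + 1)) := by
  intro fuel
  induction fuel with
  | zero =>
    intro L count hfuel hLR hcnt
    have hLR' : L = R := by omega
    rw [shrinkA]
    exact ⟨le_refl _, hLR, hcnt, Or.inl hLR', fun j h1 h2 => absurd (lt_of_le_of_lt h1 h2) (lt_irrefl _)⟩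
  | succ n ih =>
    intro L count hfuel hLR hcnt
    rw [shrinkA]
    by_cases hcond : L < R ∧ (K < (count.size : Int) ∨ m < (R : Int) - (L : Int) + 1)
    · rw [if_pos hcond]
      simp only []
      have hLlen : L < cs.length := lt_of_lt_of_le hcond.1 (le_of_lt hR)
      have hLtk : L < (cs.take (R + 1)).length := by
        rw [List.length_take]; omega
      have hwin : winA cs L (R + 1) = cs[L] :: winA cs (L + 1) (R + 1) := by
        unfold winA
        rw [List.drop_eq_getElem_cons hLtk, List.getElem_take]
      have hc : cs.getD L ' ' = cs[L] := List.getD_eq_getElem cs ' ' hLlen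
      have hcnt' : IsCounter count (cs[L] :: winA cs (L + 1) (R + 1)) := hwin ▸ hcnt
      have hcnt2 := isCounter_pop hcnt'
      simp only [hc]
      obtain ⟨h1, h2, h3, h4, h5⟩ := ih (L + 1) _ (by omega) hcond.1 hcnt2
      refine ⟨by omega, h2, h3, h4, ?_⟩
      intro j hj1 hj2
      by_cases hjL : j = L
      · subst hjL
        rcases hcond.2 with hsz | hsz
        · left
          rw [size_eq_card hcnt] at hsz
          exact hsz
        · right
          exact hsz
      · exact h5 j (by omega) hj2
    · rw [if_neg hcond]
      refine ⟨le_refl _, hLR, hcnt, ?_, fun j h1 h2 => absurd (lt_of_le_of_lt h1 h2) (lt_irrefl _)⟩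
      by_cases hLR2 : L = R
      · exact Or.inl hLR2
      · right
        have hlt : L < R := lt_of_le_of_ne hLR hLR2
        have hnot : ¬ (K < (count.size : Int) ∨ m < (R : Int) - (L : Int) + 1) :=
          fun h => hcond ⟨hlt, h⟩
        rw [size_eq_card hcnt] at hnot
        constructor
        · show ((winA cs L (R + 1)).toFinset.card : Int) ≤ K
          omega
        · show (R : Int) - (L : Int) + 1 ≤ m
          omega

-- main invariant of A's loop (1 ≤ m; when m = 1 also 1 ≤ K)
theorem invA (cs : List Char) (K m : Int) (hm : 1 ≤ m) (hK : m = 1 → 1 ≤ K) :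
    ∀ k : Nat, k ≤ cs.length →
    (loopA cs K m k).L ≤ k ∧
    ((k : Int) - (loopA cs K m k).L ≤ m) ∧
    IsCounter (loopA cs K m k).count (winA cs (loopA cs K m k).L k) ∧
    (∀ j : Nat, j < (loopA cs K m k).L → (k : Int) - (j : Int) ≤ m →
       K < ((winA cs j k).toFinset.card : Int)) ∧
    (loopA cs K m k).occ = (loopB cs K m.toNat (k + 1 - m.toNat)).1 ∧
    (loopA cs K m k).result = (loopB cs K m.toNat (k + 1 - m.toNat)).2 := by
  intro k
  induction k with
  | zero =>
    intro _
    have h0 : 0 + 1 - m.toNat = 0 := by omega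
    rw [h0]
    refine ⟨le_refl _, by simp [loopA]; omega, ?_, ?_, ?_, ?_⟩
    · simpa [loopA, winA] using isCounter_empty
    · intro j hj; simp [loopA] at hj
    · simp [loopA, loopB]
    · simp [loopA, loopB]
  | succ k ihk =>
    intro hk1
    have hklt : k < cs.length := hk1
    obtain ⟨hL, hsize, hcnt, hd, hocc, hres⟩ := ihk (by omega)
    rw [loopA_succ]
    have hc : cs.getD k ' ' = cs[k] := List.getD_eq_getElem cs ' ' hklt
    have htk : cs.take (k + 1) = cs.take k ++ [cs[k]] := by
      rw [List.take_add_one, List.getElem?_eq_getElem hklt]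
      rfl
    have hdropapp : ∀ j : Nat, j ≤ k → winA cs j (k + 1) = winA cs j k ++ [cs[k]] := by
      intro j hj
      unfold winA
      rw [htk, List.drop_append_of_le_length (by rw [List.length_take]; omega)]
    have hmono : ∀ j : Nat, j ≤ k →
        ((winA cs j k).toFinset.card : Int) ≤ ((winA cs j (k + 1)).toFinset.card : Int) := by
      intro j hj
      rw [hdropapp j hj]
      exact_mod_cast card_mono (List.sublist_append_left _ _)
    -- the incremented counter
    have hcnt1 : IsCounter
        ((loopA cs K m k).count.insert (cs.getD k ' ')
          ((loopA cs K m k).count.getD (cs.getD k ' ') 0 + 1))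
        (winA cs (loopA cs K m k).L (k + 1)) := by
      rw [hc, hdropapp _ hL]
      exact isCounter_push hcnt cs[k]
    obtain ⟨s1, s2, s3, s4, s5⟩ :=
      shrink_spec cs K m k hklt k (loopA cs K m k).L _ (by omega) hL hcnt1
    -- abbreviate the shrink result
    set p := shrinkA cs K m k k
        ((loopA cs K m k).count.insert (cs.getD k ' ')
          ((loopA cs K m k).count.getD (cs.getD k ' ') 0 + 1)) (loopA cs K m k).L with hp
    -- the new exclusion invariant, valid in both branches
    have hd' : ∀ j : Nat, j < p.2 → ((k : Int) + 1) - (j : Int) ≤ m →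
        K < ((winA cs j (k + 1)).toFinset.card : Int) := by
      intro j hj hjm
      by_cases hjL : j < (loopA cs K m k).L
      · have h1 := hd j hjL (by omega)
        have h2 := hmono j (by omega)
        omega
      · rcases s5 j (by omega) hj with h | h
        · exact h
        · omega
    have hstep : stepA cs K m (loopA cs K m k) k =
        if (k : Int) - (p.2 : Int) + 1 = m then
          { count := p.1, L := p.2,
            occ := (loopA cs K m k).occ.insert
              (String.ofList ((cs.drop p.2).take (k + 1 - p.2)))
              ((loopA cs K m k).occ.getD
                (String.ofList ((cs.drop p.2).take (k + 1 - p.2))) 0 + 1),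
            result := max (loopA cs K m k).result
              ((loopA cs K m k).occ.getD
                (String.ofList ((cs.drop p.2).take (k + 1 - p.2))) 0 + 1) }
        else
          { count := p.1, L := p.2, occ := (loopA cs K m k).occ,
            result := (loopA cs K m k).result } := by
      rw [stepA]
    by_cases hrec : (k : Int) - (p.2 : Int) + 1 = m
    · -- A records the window s[p.2 : k+1]; B's iteration i = p.2 records the same
      rw [hstep, if_pos hrec]
      have hw2 : k + 1 - m.toNat = p.2 := by omega
      have ht2 : k + 1 + 1 - m.toNat = (k + 1 - m.toNat) + 1 := by omega
      have hmt : k + 1 - p.2 = m.toNat := by omega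
      have hsub : (cs.drop p.2).take (k + 1 - p.2) = winA cs p.2 (k + 1) := by
        unfold winA
        rw [List.drop_take]
      -- the recorded window is valid
      have hvalid : ((winA cs p.2 (k + 1)).toFinset.card : Int) ≤ K := by
        rcases s4 with h | h
        · -- p.2 = k forces m = 1, where 1 ≤ K
          have hm1 : m = 1 := by omega
          have hwin1 : winA cs p.2 (k + 1) = [cs[k]] := by
            unfold winA
            rw [htk, h, List.drop_append_of_le_length (by rw [List.length_take]; omega)]
            have : (cs.take k).drop k = [] := by
              apply List.drop_eq_nil_of_le
              rw [List.length_take]; omega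
            rw [this]; rfl
          rw [hwin1]
          simp
          exact hK hm1
        · exact h.1
      have hBstep : loopB cs K m.toNat (k + 1 + 1 - m.toNat) =
          stepB cs K m.toNat (loopB cs K m.toNat (k + 1 - m.toNat)) p.2 := by
        rw [ht2, loopB_succ, hw2]
      rw [hBstep, stepB]
      have hsub2 : (cs.drop p.2).take m.toNat = winA cs p.2 (k + 1) := by
        rw [← hmt, hsub]
      rw [hsub2]
      have hcond : ((PySem.Set.ofList (winA cs p.2 (k + 1))).length : Int) ≤ K := by
        rw [setLen_eq_card]; exact hvalid
      rw [if_pos hcond]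
      refine ⟨?_, ?_, s3, hd', ?_, ?_⟩
      · show p.2 ≤ k + 1
        omega
      · show ((k : Int) + 1) - (p.2 : Int) ≤ m
        omega
      · show (loopA cs K m k).occ.insert
            (String.ofList ((cs.drop p.2).take (k + 1 - p.2)))
            ((loopA cs K m k).occ.getD
              (String.ofList ((cs.drop p.2).take (k + 1 - p.2))) 0 + 1) = _
        rw [hmt, hsub2, hocc]
      · show max (loopA cs K m k).result
            ((loopA cs K m k).occ.getD
              (String.ofList ((cs.drop p.2).take (k + 1 - p.2))) 0 + 1) = _
        rw [hmt, hsub2, hocc, hres]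
    · -- no record; B's iteration (if any) rejects its window
      rw [hstep, if_neg hrec]
      refine ⟨?_, ?_, s3, hd', ?_, ?_⟩
      · show p.2 ≤ k + 1
        omega
      · show ((k : Int) + 1) - (p.2 : Int) ≤ m
        rcases s4 with h | h
        · omega
        · omega
      all_goals {
        first
          | show (loopA cs K m k).occ = _
          | show (loopA cs K m k).result = _
        by_cases hbig : m.toNat ≤ k + 1
        case neg =>
          have : k + 1 + 1 - m.toNat = k + 1 - m.toNat := by omega
          rw [this]
          first
            | exact hocc
            | exact hres
        case pos =>
          -- B processes i = w := k+1-m.toNat; its window has too many letters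
          have hw : ((k + 1 - m.toNat : Nat) : Int) = (k : Int) + 1 - m := by omega
          have hinvalid : K < ((winA cs (k + 1 - m.toNat) (k + 1)).toFinset.card : Int) := by
            by_contra hval
            push Not at hval
            -- then the shrink loop would have stopped exactly at w, recording
            have hLw : (loopA cs K m k).L ≤ k + 1 - m.toNat := by
              by_contra hgt
              push Not at hgt
              have h1 := hd (k + 1 - m.toNat) (by omega) (by omega)
              have h2 := hmono (k + 1 - m.toNat) (by omega)
              omega
            have hple : p.2 ≤ k + 1 - m.toNat := by
              by_contra hplt
              push Not at hplt
              rcases s5 (k + 1 - m.toNat) hLw hplt with h | h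
              · omega
              · omega
            have hpge : k + 1 - m.toNat ≤ p.2 := by
              rcases s4 with h | h
              · omega
              · omega
            omega
          have ht2 : k + 1 + 1 - m.toNat = (k + 1 - m.toNat) + 1 := by omega
          rw [ht2, loopB_succ, stepB]
          have hsub2 : (cs.drop (k + 1 - m.toNat)).take m.toNat = winA cs (k + 1 - m.toNat) (k + 1) := by
            unfold winA
            rw [List.drop_take]
            congr 1
            omega
          rw [hsub2]
          have hcond : ¬ ((PySem.Set.ofList (winA cs (k + 1 - m.toNat) (k + 1))).length : Int) ≤ K := by
            rw [setLen_eq_card]; omega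
          rw [if_neg hcond]
          first
            | exact hocc
            | exact hres
      }

-- simple bound for the shrink loop (used for min_size ≤ 0)
theorem shrink_L_le (cs : List Char) (K m : Int) (R : Nat) :
    ∀ (fuel L : Nat) (count : PySem.Dict Char Int), L ≤ R →
    L ≤ (shrinkA cs K m R fuel count L).2 ∧ (shrinkA cs K m R fuel count L).2 ≤ R := by
  intro fuel
  induction fuel with
  | zero =>
    intro L count hLR
    rw [shrinkA]
    exact ⟨le_refl _, hLR⟩
  | succ n ih =>
    intro L count hLR
    rw [shrinkA]
    split
    · next h =>
      simp only []
      obtain ⟨h1, h2⟩ := ih (L + 1) _ h.1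
      exact ⟨by omega, h2⟩
    · exact ⟨le_refl _, hLR⟩

theorem solution_of_nonpos (s : String) (K m mx : Int) (hm : m < 1) :
    solution s K m mx = 0 := by
  have key : ∀ k : Nat, (loopA s.toList K m k).L ≤ k ∧ (loopA s.toList K m k).result = 0 := by
    intro k
    induction k with
    | zero => exact ⟨le_refl _, rfl⟩
    | succ k ih =>
      obtain ⟨hL, hres⟩ := ih
      rw [loopA_succ]
      obtain ⟨t1, t2⟩ := shrink_L_le s.toList K m k k (loopA s.toList K m k).L
        ((loopA s.toList K m k).count.insert (s.toList.getD k ' ')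
          ((loopA s.toList K m k).count.getD (s.toList.getD k ' ') 0 + 1)) hL
      set p := shrinkA s.toList K m k k
        ((loopA s.toList K m k).count.insert (s.toList.getD k ' ')
          ((loopA s.toList K m k).count.getD (s.toList.getD k ' ') 0 + 1)) (loopA s.toList K m k).L with hp
      have hstep : stepA s.toList K m (loopA s.toList K m k) k =
          if (k : Int) - (p.2 : Int) + 1 = m then
            { count := p.1, L := p.2,
              occ := (loopA s.toList K m k).occ.insert
                (String.ofList ((s.toList.drop p.2).take (k + 1 - p.2)))
                ((loopA s.toList K m k).occ.getD
                  (String.ofList ((s.toList.drop p.2).take (k + 1 - p.2))) 0 + 1),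
              result := max (loopA s.toList K m k).result
                ((loopA s.toList K m k).occ.getD
                  (String.ofList ((s.toList.drop p.2).take (k + 1 - p.2))) 0 + 1) }
          else
            { count := p.1, L := p.2, occ := (loopA s.toList K m k).occ,
              result := (loopA s.toList K m k).result } := by
        rw [stepA]
      have hno : ¬ ((k : Int) - (p.2 : Int) + 1 = m) := by omega
      rw [hstep, if_neg hno]
      exact ⟨show p.2 ≤ k + 1 by omega, hres⟩
  exact (key s.toList.length).2

theorem alt_eq (s : String) (K m mx : Int) (hm : ¬ m < 1) :
    solution_alt s K m mx = (loopB s.toList K m.toNat (s.toList.length + 1 - m.toNat)).2 := by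
  unfold solution_alt loopB
  rw [if_neg hm]

theorem main_eq (s : String) (K m mx : Int) (hm : 1 ≤ m) (hK : m = 1 → 1 ≤ K) :
    solution s K m mx = solution_alt s K m mx := by
  have h := (invA s.toList K m hm hK s.toList.length (le_refl _)).2.2.2.2.2
  show (loopA s.toList K m s.toList.length).result = _
  rw [h, alt_eq s K m mx (by omega)]

theorem empty_eq (s : String) (K m mx : Int) (hs : s = "") (hm : 1 ≤ m) :
    solution s K m mx = solution_alt s K m mx := by
  subst hs
  show (loopA "".toList K m "".toList.length).result = _
  rw [alt_eq _ K m mx (by omega)]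
  have hnil : ("" : String).toList = [] := rfl
  rw [hnil]
  have h0 : ([] : List Char).length + 1 - m.toNat = 0 := by
    simp
    omega
  rw [h0]
  rfl

theorem alt_zero_of_D (s : String) (K mx : Int) (hK : K < 1) :
    solution_alt s K 1 mx = 0 := by
  rw [alt_eq s K 1 mx (by omega)]
  unfold loopB
  have hcongr : (List.range (s.toList.length + 1 - (1 : Int).toNat)).foldl
      (stepB s.toList K (1 : Int).toNat) (PySem.Dict.empty, 0) =
      (List.range (s.toList.length + 1 - (1 : Int).toNat)).foldl
      (fun acc _ => acc) (PySem.Dict.empty, 0) := by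
    apply PySem.List.foldl_congr_mem
    intro st i hi
    have hilt : i < s.toList.length := by
      have := List.mem_range.mp hi
      omega
    rw [stepB]
    have hdrop : (s.toList.drop i).take (1 : Int).toNat = [s.toList[i]] := by
      rw [List.drop_eq_getElem_cons hilt]
      rfl
    rw [hdrop]
    have hset : ((PySem.Set.ofList [s.toList[i]]).length : Int) = 1 := by
      simp [PySem.Set.ofList, PySem.Set.add, PySem.Set.empty, PySem.Set.contains]
    rw [if_neg (by omega)]
  rw [hcongr, PySem.List.foldl_ignore]

theorem stepA_result_le (cs : List Char) (K m : Int) (st : StateA) (R : Nat) :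
    st.result ≤ (stepA cs K m st R).result := by
  rw [stepA]
  split
  · exact le_max_left _ _
  · exact le_refl _

theorem loopA_result_mono (cs : List Char) (K m : Int) :
    ∀ k k' : Nat, k ≤ k' → (loopA cs K m k).result ≤ (loopA cs K m k').result := by
  intro k k' hkk
  induction k' with
  | zero =>
    have : k = 0 := by omega
    subst this
    exact le_refl _
  | succ k' ih =>
    by_cases h : k = k' + 1
    · subst h
      exact le_refl _
    · have h1 := ih (by omega)
      rw [loopA_succ]
      exact le_trans h1 (stepA_result_le _ _ _ _ _)

theorem solution_pos_of_D (s : String) (K mx : Int) (hs : s ≠ "") :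
    1 ≤ solution s K 1 mx := by
  have hne : s.toList ≠ [] := by
    intro h0
    exact hs (by simpa using congrArg String.ofList h0)
  have hlen : 1 ≤ s.toList.length := List.length_pos_of_ne_nil hne
  have h1 : (loopA s.toList K 1 1).result = 1 := by
    rw [show (1 : Nat) = 0 + 1 from rfl, loopA_succ]
    rw [stepA]
    have hfuel : shrinkA s.toList K 1 0 0
        ((loopA s.toList K 1 0).count.insert (s.toList.getD 0 ' ')
          ((loopA s.toList K 1 0).count.getD (s.toList.getD 0 ' ') 0 + 1)) (loopA s.toList K 1 0).L =
        (((loopA s.toList K 1 0).count.insert (s.toList.getD 0 ' ')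
          ((loopA s.toList K 1 0).count.getD (s.toList.getD 0 ' ') 0 + 1)), (loopA s.toList K 1 0).L) := by
      rfl
    rw [hfuel]
    have hL0 : (loopA s.toList K 1 0).L = 0 := rfl
    rw [hL0]
    rw [if_pos (by norm_num : ((0 : Nat) : Int) - ((0 : Nat) : Int) + 1 = (1 : Int))]
    have hocc0 : (loopA s.toList K 1 0).occ = PySem.Dict.empty := rfl
    have hres0 : (loopA s.toList K 1 0).result = 0 := rfl
    rw [hocc0, hres0]
    simp [PySem.Dict.getD_empty]
  calc (1 : Int) = (loopA s.toList K 1 1).result := h1.symm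
    _ ≤ (loopA s.toList K 1 s.toList.length).result := loopA_result_mono _ _ _ 1 _ hlen

-- ===== VERDICT (by name: the statement is the Claim_ definition above) =====
theorem solution_spec : Claim_unchanged_solution := by
  intro s K m mx _
  unfold Spec_solution
  intro hnD
  by_cases hm : m < 1
  · rw [solution_of_nonpos s K m mx hm, solution_alt, if_pos hm]
  · replace hm : 1 ≤ m := by omega
    by_cases h1 : m = 1
    · by_cases hK : 1 ≤ K
      · exact main_eq s K m mx hm (fun _ => hK)
      · have hs : s = "" := by
          by_contra hs
          exact hnD ⟨h1, by omega, hs⟩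
        exact empty_eq s K m mx hs hm
    · exact main_eq s K m mx hm (fun h => absurd h h1)

theorem solution_changed : Claim_changed_solution := by
  unfold Claim_changed_solution; decide

theorem solution_tight : Claim_exact_solution := by
  intro s K m mx _ hD
  obtain ⟨h1, hK, hs⟩ := hD
  subst h1
  rw [alt_zero_of_D s K mx hK]
  have := solution_pos_of_D s K mx hs
  omega
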